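-- pv_equiv track=rewrite | github.com/jinhao-byte/DistanceMetric | VDM2025-1-3.py | stratStep
-- ===== SOURCE A (Python) =====
-- def stratStep(Data):
--     # 对Data进行处理
--     newVec = []
--     start = 0
--     j = 0
--     while len(newVec) < len(Data):
--         j = start
--         while j < len(Data):
--             newVec.append(Data[j])
--             j = j + 10
--         start = start + 1
--     return newVec
-- ===== SOURCE B (Python) =====
-- def stratStep(Data):
--     buckets = [[] for _ in range(10)]
--     for i, x in enumerate(Data):
--         buckets[i % 10].append(x)
--     return [x for b in buckets for x in b]
-- ===== Notes on version B (the rewrite author's own statement) =====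
-- stated objective: idiomatic
-- what changed: Replaces A's repeated strided rescans of Data (one pass per residue, re-walking the list each time) with a single distributing pass that drops each element into buckets[i % 10] and then flattens the ten buckets.
import Mathlib
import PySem

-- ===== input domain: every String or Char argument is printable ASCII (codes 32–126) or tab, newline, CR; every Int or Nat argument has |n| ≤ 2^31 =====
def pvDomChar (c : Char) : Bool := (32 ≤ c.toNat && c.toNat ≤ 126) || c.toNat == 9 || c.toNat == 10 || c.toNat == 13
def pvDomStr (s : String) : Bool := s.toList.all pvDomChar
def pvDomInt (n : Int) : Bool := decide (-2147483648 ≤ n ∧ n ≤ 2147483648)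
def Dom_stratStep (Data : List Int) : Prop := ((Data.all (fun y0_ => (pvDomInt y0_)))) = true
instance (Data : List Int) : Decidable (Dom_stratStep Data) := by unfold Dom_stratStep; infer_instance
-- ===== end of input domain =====

-- B replaces A's repeated strided rescans (one pass per residue class) with a single
-- distributing pass into ten buckets followed by a flatten; same values, same order.


-- ===== PORT A =====
-- inner while loop: 'while j < len(Data): newVec.append(Data[j]); j = j + 10'
-- (Data[j] with 0 ≤ j < len(Data) guaranteed by the loop guard, so getD is exact)
def pvInnerA (Data : List Int) (j : Nat) (acc : List Int) : List Int :=
  if j < Data.length then pvInnerA Data (j + 10) (acc ++ [Data.getD j 0]) else acc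
  termination_by Data.length - j

-- outer while loop: 'while len(newVec) < len(Data): <inner pass from start>; start += 1'.
-- The extra 'acc.length < …' test is a totality guard only: whenever the outer guard
-- holds, the Python inner pass appends at least one element (proved below in
-- pvOuterA_eq), so the else-branch is never taken on any input.
def pvOuterA (Data : List Int) (start : Nat) (acc : List Int) : List Int :=
  if acc.length < Data.length then
    if _h : acc.length < (pvInnerA Data start acc).length then
      pvOuterA Data (start + 1) (pvInnerA Data start acc)
    else pvInnerA Data start acc
  else acc
  termination_by Data.length - acc.length
  decreasing_by omega

def stratStep (Data : List Int) : List Int := pvOuterA Data 0 []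

-- ===== PORT B =====
-- buckets = [[] for _ in range(10)]; for i, x in enumerate(Data): buckets[i % 10].append(x);
-- return [x for b in buckets for x in b]
-- (enumerate indices are ≥ 0, so (i % 10).toNat is exact for the Nat-indexed List.modify)
def stratStep_alt (Data : List Int) : List Int :=
  let buckets :=
    (PySem.List.enumerate Data).foldl
      (fun bs p => bs.modify (PySem.Int.mod p.1 10).toNat (· ++ [p.2]))
      (List.replicate 10 ([] : List Int))
  buckets.flatten

-- ===== PRECONDITION & SPEC =====
def Spec_stratStep (Data : List Int) (out : List Int) : Prop := out = stratStep_alt Data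
instance (Data : List Int) (out : List Int) : Decidable (Spec_stratStep Data out) := by unfold Spec_stratStep; infer_instance

-- ===== CLAIM (what is proved, stated in full; the proofs are below) =====
def Claim_equal_stratStep : Prop := ∀ (Data : List Int), Dom_stratStep Data → Spec_stratStep Data (stratStep Data)

-- ===== LEMMAS AND PROOFS =====

-- the elements of Data at indices j, j+10, j+20, … (the common description of one bucket)
def strideL (Data : List Int) (j : Nat) : List Int :=
  if j < Data.length then Data.getD j 0 :: strideL Data (j + 10) else []
  termination_by Data.length - j

theorem pvInnerA_eq (Data : List Int) (j : Nat) (acc : List Int) :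
    pvInnerA Data j acc = acc ++ strideL Data j := by
  fun_induction pvInnerA Data j acc with
  | case1 j acc h ih => rw [strideL, if_pos h, ih, List.append_assoc, List.singleton_append]
  | case2 j acc h => rw [strideL, if_neg h, List.append_nil]

theorem strideL_length (Data : List Int) (j : Nat) :
    (strideL Data j).length = (Data.length - j + 9) / 10 := by
  fun_induction strideL Data j with
  | case1 j h ih => simp only [List.length_cons, ih]; omega
  | case2 j h => simp only [List.length_nil]; omega


theorem strideL_append (xs : List Int) (x : Int) (j : Nat) :
    strideL (xs ++ [x]) j =
      strideL xs j ++ (if j ≤ xs.length ∧ xs.length % 10 = j % 10 then [x] else []) := by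
  fun_induction strideL (xs ++ [x]) j with
  | case1 j h ih =>
    rw [ih]
    simp only [List.length_append, List.length_cons, List.length_nil] at h
    by_cases hj : j < xs.length
    · conv_rhs => rw [strideL]
      rw [if_pos hj]
      have hget : (xs ++ [x]).getD j 0 = xs.getD j 0 := by
        simp [List.getD, List.getElem?_append_left hj]
      rw [hget]
      by_cases hc : j + 10 ≤ xs.length ∧ xs.length % 10 = (j + 10) % 10
      · rw [if_pos hc, if_pos (by omega)]; simp
      · rw [if_neg hc, if_neg (by omega)]; simp
    · have hjeq : j = xs.length := by omega
      subst hjeq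
      rw [if_neg (by omega)]
      conv_lhs => rw [strideL]
      rw [if_neg (by omega)]
      conv_rhs => rw [strideL]
      rw [if_neg (by omega), if_pos (by omega)]
      have h1 : (xs ++ [x]).getD xs.length 0 = x := by simp [List.getD]
      rw [h1]; rfl
  | case2 j h =>
    simp only [List.length_append, List.length_cons, List.length_nil] at h
    conv_rhs => rw [strideL]
    rw [if_neg (by omega), if_neg (by omega)]
    rfl


-- the B-side loop builds exactly the ten stride lists
theorem buckets_eq (Data : List Int) :
    ((PySem.List.enumerate Data).foldl
        (fun bs p => bs.modify (PySem.Int.mod p.1 10).toNat (· ++ [p.2]))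
        (List.replicate 10 ([] : List Int)))
      = (List.range 10).map (strideL Data) := by
  induction Data using List.reverseRecOn with
  | nil =>
    simp only [PySem.List.enumerate_nil, List.foldl_nil]
    refine List.ext_getElem (by simp) ?_
    intro k h1 h2
    simp only [List.getElem_replicate, List.getElem_map, List.getElem_range]
    rw [strideL]; simp
  | append_singleton xs x ih =>
    rw [show PySem.List.enumerate (xs ++ [x]) = PySem.List.enumerate (xs ++ [x]) 0 from rfl,
        PySem.List.enumerate_append, List.foldl_append]
    rw [show PySem.List.enumerate xs 0 = PySem.List.enumerate xs from rfl, ih]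
    rw [PySem.List.enumerate_cons, PySem.List.enumerate_nil, List.foldl_cons, List.foldl_nil]
    have hmod : (PySem.Int.mod ((0 : Int) + ↑xs.length, x).1 10).toNat = xs.length % 10 := by
      show (PySem.Int.mod ((0 : Int) + ↑xs.length) 10).toNat = xs.length % 10
      rw [PySem.Int.mod_eq_emod_of_pos (by norm_num)]
      omega
    refine List.ext_getElem (by simp) ?_
    intro k h1 h2
    have hk : k < 10 := by simpa using h2
    simp only [List.getElem_modify, hmod]
    simp only [List.getElem_map, List.getElem_range]
    rw [strideL_append]
    by_cases hc : xs.length % 10 = k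
    · rw [if_pos hc, if_pos (by constructor <;> omega)]
    · rw [if_neg hc, if_neg (by omega)]
      simp


-- one modify at a valid index adds exactly one element to the total bucket contents
theorem sum_len_modify (bs : List (List Int)) (x : Int) : ∀ i, i < bs.length →
    ((bs.modify i (· ++ [x])).map List.length).sum = (bs.map List.length).sum + 1 := by
  induction bs with
  | nil => intro i h; simp at h
  | cons b bs ih =>
    intro i h
    cases i with
    | zero => simp [List.modify]; omega
    | succ i =>
      simp only [List.length_cons] at h
      have hstep : (b :: bs).modify (i + 1) (· ++ [x]) = b :: bs.modify i (· ++ [x]) := by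
        simp [List.modify]
      rw [hstep]
      simp only [List.map_cons, List.sum_cons, ih i (by omega)]
      omega

-- the distributing pass adds one element per pair of the enumeration
theorem sum_len_fold (l : List (Int × Int)) : ∀ bs : List (List Int), bs.length = 10 →
    ((l.foldl (fun bs p => bs.modify (PySem.Int.mod p.1 10).toNat (· ++ [p.2])) bs).map
        List.length).sum
      = (bs.map List.length).sum + l.length := by
  induction l with
  | nil => intro bs _; simp
  | cons p l ih =>
    intro bs hlen
    rw [List.foldl_cons, ih _ (by rw [List.length_modify]; exact hlen)]
    rw [sum_len_modify _ p.2 _ (by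
      have h1 := PySem.Int.mod_nonneg p.1 (b := 10) (by norm_num)
      have h2 := PySem.Int.mod_lt p.1 (b := 10) (by norm_num)
      omega)]
    simp only [List.length_cons]
    omega

-- the ten stride lists together carry every element of Data exactly once
theorem total_sum (Data : List Int) :
    ((List.range' 0 10).map (fun j => (strideL Data j).length)).sum = Data.length := by
  have h := congrArg (fun bs => (bs.map List.length).sum) (buckets_eq Data)
  simp only at h
  rw [sum_len_fold _ _ (by simp)] at h
  rw [PySem.List.length_enumerate, List.map_map] at h
  simp only [List.map_replicate, List.length_nil, List.sum_replicate, smul_eq_mul,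
    Nat.mul_zero, Nat.zero_add, List.range_eq_range'] at h
  rw [h]
  simp [Function.comp_def]

-- no work remains in the strides once start passes the end of Data
theorem rem_zero (Data : List Int) (cnt : Nat) : ∀ start, Data.length ≤ start →
    (((List.range' start cnt).map (fun k => (strideL Data k).length)).sum = 0) := by
  induction cnt with
  | zero => simp
  | succ c ih =>
    intro start h
    rw [List.range'_succ]
    simp only [List.map_cons, List.sum_cons]
    rw [strideL_length, ih (start + 1) (by omega)]
    omega

-- the outer loop, under its length invariant, emits the remaining stride lists in order
theorem pvOuterA_eq (Data : List Int) : ∀ (k start : Nat) (acc : List Int),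
    start + k = 10 →
    acc.length + (((List.range' start k).map (fun j => (strideL Data j).length)).sum) = Data.length →
    pvOuterA Data start acc = acc ++ (List.range' start k).flatMap (strideL Data) := by
  intro k
  induction k with
  | zero =>
    intro start acc _ hinv
    simp only [List.range'_zero, List.map_nil, List.sum_nil, Nat.add_zero] at hinv
    rw [pvOuterA, if_neg (by omega)]
    simp
  | succ c ih =>
    intro start acc hs hinv
    rw [List.range'_succ] at hinv ⊢
    simp only [List.map_cons, List.sum_cons] at hinv
    by_cases hlt : acc.length < Data.length
    · have hpos : 0 < (strideL Data start).length := by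
        rcases Nat.eq_zero_or_pos (strideL Data start).length with h0 | hp
        · rw [strideL_length] at h0
          rw [rem_zero Data c (start + 1) (by omega)] at hinv
          omega
        · exact hp
      rw [pvOuterA, if_pos hlt, pvInnerA_eq,
          dif_pos (by simp only [List.length_append]; omega)]
      rw [ih (start + 1) (acc ++ strideL Data start) (by omega)
            (by simp only [List.length_append]; omega)]
      simp
    · rw [pvOuterA, if_neg hlt]
      have hflat : ((start :: List.range' (start + 1) c).flatMap (strideL Data)) = [] := by
        apply List.eq_nil_of_length_eq_zero
        rw [List.length_flatMap]
        simp only [List.map_cons, List.sum_cons]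
        omega
      rw [hflat, List.append_nil]


-- ===== VERDICT (by name: the statement is the Claim_ definition above) =====
theorem stratStep_spec : Claim_equal_stratStep := by
  intro Data _
  unfold Spec_stratStep stratStep stratStep_alt
  have hsum : ([] : List Int).length +
      (((List.range' 0 10).map (fun j => (strideL Data j).length)).sum) = Data.length := by
    rw [List.length_nil, Nat.zero_add, total_sum]
  rw [buckets_eq, ← List.flatMap_def, List.range_eq_range',
      pvOuterA_eq Data 10 0 [] rfl hsum, List.nil_append]
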